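-- pv_equiv track=rewrite | github.com/ph7klw76/Data_science_project | extractorbitalsintoexcel.py | extract_homo_extended
-- ===== SOURCE A (Python) =====
-- def extract_homo_extended(file_contents):
--     """
--     Extracts the HOMO, HOMO-1, HOMO-2, LUMO, LUMO+1, and LUMO+2 data from the given file content.
--     """
--     lines = file_contents.split("\n")
--     orbitals = []
--     for line in lines:
--         parts = line.split()
--         if len(parts) == 4:
--             occ = parts[1]
--             e_ev = parts[3]
--             orbitals.append((occ, e_ev))
--
--     # Reverse the list to find HOMO (last 2.0000), HOMO-1 (second last 2.0000), and HOMO-2 (third last 2.0000)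
--     orbitals.reverse()
--
--     homo = homo_1 = homo_2 = None
--     occ_2_counter = 0
--
--     for occ, e_ev in orbitals:
--         if occ == '2.0000':
--             occ_2_counter += 1
--             if occ_2_counter == 1:
--                 homo = e_ev
--             elif occ_2_counter == 2:
--                 homo_1 = e_ev
--             elif occ_2_counter == 3:
--                 homo_2 = e_ev
--
--     return homo, homo_1, homo_2
-- ===== SOURCE B (Python) =====
-- def extract_homo_extended(file_contents):
--     """
--     Extracts HOMO, HOMO-1, HOMO-2 in one pass: a three-slot shift register over
--     the rows with occ == '2.0000' (no intermediate list, no reverse, no counter).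
--     """
--     homo = homo_1 = homo_2 = None
--     for line in file_contents.split("\n"):
--         parts = line.split()
--         if len(parts) == 4 and parts[1] == '2.0000':
--             homo_2, homo_1, homo = homo_1, homo, parts[3]
--     return homo, homo_1, homo_2
-- ===== Notes on version B (the rewrite author's own statement) =====
-- stated objective: simpler
-- what changed: Replaced A's build-list / reverse / counter-driven second loop with a single forward pass keeping a three-slot shift register of the energies of the last three doubly-occupied rows (no intermediate list, no reverse, no counter).
import Mathlib
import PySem

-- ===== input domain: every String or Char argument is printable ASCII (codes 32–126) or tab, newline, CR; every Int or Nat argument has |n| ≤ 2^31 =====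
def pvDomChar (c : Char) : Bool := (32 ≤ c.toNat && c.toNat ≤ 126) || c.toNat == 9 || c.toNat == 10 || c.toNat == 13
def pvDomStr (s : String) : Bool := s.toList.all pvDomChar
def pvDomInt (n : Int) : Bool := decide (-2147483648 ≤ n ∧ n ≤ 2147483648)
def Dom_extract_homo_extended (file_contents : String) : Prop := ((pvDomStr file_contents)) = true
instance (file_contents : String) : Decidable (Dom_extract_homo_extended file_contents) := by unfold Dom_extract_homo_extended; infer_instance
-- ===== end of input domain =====

-- B replaces A's build-list / reverse / counter-driven selection by a single forward pass
-- keeping a three-slot shift register of the last three doubly-occupied rows' energies (objective: simpler).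

-- ===== PORT A =====
-- body of A's first loop: append (occ, e_ev) when the line has 4 fields
def pvAccStep (acc : List (String × String)) (line : String) : List (String × String) :=
  let parts := PySem.Str.split₀ line
  if parts.length == 4 then
    acc ++ [(PySem.List.pyGetD parts 1 "", PySem.List.pyGetD parts 3 "")]
  else acc

-- body of A's second loop: counter-driven assignment of homo / homo_1 / homo_2
def pvStepA (st : Option String × Option String × Option String × Nat) (p : String × String) :
    Option String × Option String × Option String × Nat :=
  if p.1 == "2.0000" then
    let c := st.2.2.2 + 1
    if c == 1 then (some p.2, st.2.1, st.2.2.1, c)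
    else if c == 2 then (st.1, some p.2, st.2.2.1, c)
    else if c == 3 then (st.1, st.2.1, some p.2, c)
    else (st.1, st.2.1, st.2.2.1, c)
  else st

def extract_homo_extended (file_contents : String) : Option String × Option String × Option String :=
  let lines := (PySem.Str.split? file_contents "\n").getD []   -- sep "\n" ≠ "": split? is always some here
  let orbitals := lines.foldl pvAccStep []
  let orbitalsR := orbitals.reverse
  let s := orbitalsR.foldl pvStepA (none, none, none, 0)
  (s.1, s.2.1, s.2.2.1)

-- ===== PORT B =====
-- body of B's single loop: shift register (homo_2, homo_1, homo := homo_1, homo, parts[3])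
def pvStepB (st : Option String × Option String × Option String) (line : String) :
    Option String × Option String × Option String :=
  let parts := PySem.Str.split₀ line
  if parts.length == 4 && PySem.List.pyGetD parts 1 "" == "2.0000" then
    (some (PySem.List.pyGetD parts 3 ""), st.1, st.2.1)
  else st

def extract_homo_extended_alt (file_contents : String) : Option String × Option String × Option String :=
  ((PySem.Str.split? file_contents "\n").getD []).foldl pvStepB (none, none, none)

-- ===== PRECONDITION & SPEC =====
def Spec_extract_homo_extended (file_contents : String) (out : Option String × Option String × Option String) : Prop := out = extract_homo_extended_alt file_contents
instance (file_contents : String) (out : Option String × Option String × Option String) : Decidable (Spec_extract_homo_extended file_contents out) := by unfold Spec_extract_homo_extended; infer_instance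

-- ===== CLAIM (what is proved, stated in full; the proofs are below) =====
def Claim_equal_extract_homo_extended : Prop := ∀ (file_contents : String), Dom_extract_homo_extended file_contents → Spec_extract_homo_extended file_contents (extract_homo_extended file_contents)

-- ===== LEMMAS AND PROOFS =====

-- proof-only helpers: the matching rows as filterMaps
def pvRow (line : String) : Option (String × String) :=
  let parts := PySem.Str.split₀ line
  if parts.length == 4 then some (PySem.List.pyGetD parts 1 "", PySem.List.pyGetD parts 3 "") else none

def pvM2 (p : String × String) : Option String :=
  if p.1 == "2.0000" then some p.2 else none

-- A's second loop seen only through the matches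
def pvStepA' (st : Option String × Option String × Option String × Nat) (e : String) :
    Option String × Option String × Option String × Nat :=
  let c := st.2.2.2 + 1
  if c == 1 then (some e, st.2.1, st.2.2.1, c)
  else if c == 2 then (st.1, some e, st.2.2.1, c)
  else if c == 3 then (st.1, st.2.1, some e, c)
  else (st.1, st.2.1, st.2.2.1, c)

-- B's loop seen only through the matches
def pvStepB' (st : Option String × Option String × Option String) (e : String) :
    Option String × Option String × Option String := (some e, st.1, st.2.1)

theorem pvOrbitals_eq (l : List String) (acc : List (String × String)) :
    l.foldl pvAccStep acc = acc ++ l.filterMap pvRow := by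
  induction l generalizing acc with
  | nil => simp
  | cons a t ih =>
    rw [List.foldl_cons, List.filterMap_cons, ih]
    by_cases h : ((PySem.Str.split₀ a).length == 4) = true
    · simp [pvAccStep, pvRow, h]
    · simp [pvAccStep, pvRow, h]

theorem pvFoldA_filterMap (l : List (String × String)) (s : Option String × Option String × Option String × Nat) :
    l.foldl pvStepA s = (l.filterMap pvM2).foldl pvStepA' s := by
  induction l generalizing s with
  | nil => rfl
  | cons a t ih =>
    rw [List.foldl_cons, List.filterMap_cons]
    by_cases h : (a.1 == "2.0000") = true
    · rw [ih]
      simp [pvStepA, pvStepA', pvM2, h]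
    · rw [ih]
      simp [pvStepA, pvM2, h]

theorem pvFoldA'_sat (es : List String) (h h1 h2 : Option String) (c : Nat) (hc : 3 ≤ c) :
    es.foldl pvStepA' (h, h1, h2, c) = (h, h1, h2, c + es.length) := by
  induction es generalizing c with
  | nil => rfl
  | cons e t ih =>
    rw [List.foldl_cons]
    have e1 : pvStepA' (h, h1, h2, c) e = (h, h1, h2, c + 1) := by
      simp [pvStepA', show c ≠ 0 by omega, show c ≠ 1 by omega, show c ≠ 2 by omega]
    rw [e1, ih (c + 1) (by omega)]
    simp only [List.length_cons, Prod.mk.injEq, true_and]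
    omega

theorem pvFoldA'_main (es : List String) :
    (fun s : Option String × Option String × Option String × Nat => (s.1, s.2.1, s.2.2.1))
      (es.foldl pvStepA' (none, none, none, 0)) = (es[0]?, es[1]?, es[2]?) := by
  match es with
  | [] => rfl
  | [a] => rfl
  | [a, b] => rfl
  | a :: b :: c :: rest =>
    show (fun s : Option String × Option String × Option String × Nat => (s.1, s.2.1, s.2.2.1))
      (rest.foldl pvStepA' (some a, some b, some c, 3)) = _
    rw [pvFoldA'_sat rest (some a) (some b) (some c) 3 (by omega)]
    rfl

theorem pvFoldB_filterMap (l : List String) (s : Option String × Option String × Option String) :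
    l.foldl pvStepB s = (l.filterMap (fun line => (pvRow line).bind pvM2)).foldl pvStepB' s := by
  induction l generalizing s with
  | nil => rfl
  | cons a t ih =>
    rw [List.foldl_cons, List.filterMap_cons]
    by_cases h4 : (PySem.Str.split₀ a).length = 4
    · by_cases h2 : PySem.List.pyGetD (PySem.Str.split₀ a) 1 "" = "2.0000"
      · rw [ih]
        simp [pvStepB, pvStepB', pvRow, pvM2, h4, h2]
      · rw [ih]
        simp [pvStepB, pvRow, pvM2, h4, h2]
    · rw [ih]
      simp [pvStepB, pvRow, h4]

theorem pvFoldB'_main (es : List String) :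
    es.foldl pvStepB' (none, none, none) = (es.reverse[0]?, es.reverse[1]?, es.reverse[2]?) := by
  induction es using List.reverseRecOn with
  | nil => rfl
  | append_singleton t e ih =>
    rw [List.foldl_append, ih]
    simp [pvStepB']

-- ===== VERDICT (by name: the statement is the Claim_ definition above) =====
theorem extract_homo_extended_spec : Claim_equal_extract_homo_extended := by
  intro fc _
  show extract_homo_extended fc = extract_homo_extended_alt fc
  simp only [extract_homo_extended, extract_homo_extended_alt]
  rw [pvOrbitals_eq, List.nil_append, pvFoldA_filterMap, List.filterMap_reverse,
    List.filterMap_filterMap, pvFoldB_filterMap, pvFoldB'_main]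
  exact pvFoldA'_main _
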